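-- pv_equiv track=rewrite | github.com/LiamTodd/algorithms-and-data-structures-store | 2024/code_signal/pairs_in_contig_arrays.py | solution_OK
-- ===== SOURCE A (Python) =====
-- def solution_OK(a, m, k):
--     # works, still too slow
--
--     # find all pairings which are at most 'm' elements apart which sum to give k
--     # determine index length between them
--     # determine how many subarrays each pairing will belong to
--
--     subarrays = [
--         0 for _ in range(len(a) - m + 1)
--     ]  # tracks which subarrays starting at a given index contain a pair summing to k
--     for i in range(len(a)):
--         for j in range(i + 1, min(i + m, len(a))):
--             if a[i] + a[j] == k:
--                 distance = j - i
--                 if distance < m: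
--                     count = m - distance  # how many subarrays the pair appears in
--                     for n in range(i - count + 1, i + 1):
--                         if n in range(len(subarrays)):
--                             subarrays[n] = 1
--     return sum(subarrays)
-- ===== SOURCE B (Python) =====
-- def solution_OK(a, m, k):
--     # Per-window scan: walk each window once keeping a set of the values seen so far;
--     # a pair summing to k exists iff some k - a[j] was already seen in the window.
--     n = len(a)
--     total = 0
--     for s in range(n - m + 1):
--         seen = set()
--         found = 0
--         for j in range(s, s + m):
--             if k - a[j] in seen:
--                 found = 1
--                 break
--             seen.add(a[j])
--         total += found
--     return total
-- ===== Notes on version B (the rewrite author's own statement) =====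
-- stated objective: alternative
-- what changed: B scans each length-m window once left-to-right with a hash set of already-seen values (a pair exists iff k-a[j] was seen earlier in the window), instead of A's enumerating all pairs and marking an auxiliary per-window indicator array.
import Mathlib
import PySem

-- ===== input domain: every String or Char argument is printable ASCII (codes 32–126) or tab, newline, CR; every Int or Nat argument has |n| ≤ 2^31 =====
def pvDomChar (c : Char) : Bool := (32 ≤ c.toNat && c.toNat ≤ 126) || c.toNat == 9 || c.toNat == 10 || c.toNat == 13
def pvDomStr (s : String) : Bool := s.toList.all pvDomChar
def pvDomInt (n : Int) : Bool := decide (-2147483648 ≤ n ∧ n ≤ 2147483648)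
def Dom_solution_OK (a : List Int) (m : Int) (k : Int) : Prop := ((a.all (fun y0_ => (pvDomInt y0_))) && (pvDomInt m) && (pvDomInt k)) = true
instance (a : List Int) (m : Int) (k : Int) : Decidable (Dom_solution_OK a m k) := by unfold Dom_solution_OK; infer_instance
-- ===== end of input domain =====

-- B replaces A's pair enumeration with per-pair marking of an indicator array by a single
-- left-to-right scan of each window keeping a set of already-seen values.

-- ===== PORT A =====
def solution_OK (a : List Int) (m : Int) (k : Int) : Int :=
  let subarrays : List Int :=
    (PySem.List.pyRange 0 ((a.length : Int) - m + 1) 1).map (fun _ => (0 : Int))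
  let final :=
    (PySem.List.pyRange 0 (a.length : Int) 1).foldl (fun sub i =>
      (PySem.List.pyRange (i + 1) (min (i + m) (a.length : Int)) 1).foldl (fun sub j =>
        if PySem.List.pyGetD a i 0 + PySem.List.pyGetD a j 0 = k then
          let distance := j - i
          if distance < m then
            let count := m - distance
            (PySem.List.pyRange (i - count + 1) (i + 1) 1).foldl (fun sub n =>
              if 0 ≤ n ∧ n < (sub.length : Int) then sub.set n.toNat 1 else sub) sub
          else sub
        else sub) sub) subarrays
  final.sum

-- ===== PORT B =====
-- inner 'for j in range(s, s+m)' loop of Source B, with its early 'break' (returns found)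
def pvFindLoop (a : List Int) (k : Int) : List Int → PySem.Set Int → Int
  | [], _ => 0
  | j :: rest, seen =>
    if (k - PySem.List.pyGetD a j 0) ∈ seen then 1
    else pvFindLoop a k rest (seen.add (PySem.List.pyGetD a j 0))

def solution_OK_alt (a : List Int) (m : Int) (k : Int) : Int :=
  (PySem.List.pyRange 0 ((a.length : Int) - m + 1) 1).foldl
    (fun total s => total + pvFindLoop a k (PySem.List.pyRange s (s + m) 1) PySem.Set.empty)
    0

-- ===== PRECONDITION & SPEC =====
def Spec_solution_OK (a : List Int) (m : Int) (k : Int) (out : Int) : Prop := out = solution_OK_alt a m k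
instance (a : List Int) (m : Int) (k : Int) (out : Int) : Decidable (Spec_solution_OK a m k out) := by unfold Spec_solution_OK; infer_instance

-- ===== CLAIM (what is proved, stated in full; the proofs are below) =====
def Claim_equal_solution_OK : Prop := ∀ (a : List Int) (m : Int) (k : Int), Dom_solution_OK a m k → Spec_solution_OK a m k (solution_OK a m k)


-- ===== LEMMAS AND PROOFS =====

-- "window scan starting at s with already-seen set `seen` finds a pair before e"
abbrev FoundFrom (a : List Int) (k : Int) (seen : List Int) (s e : Int) : Prop :=
  ∃ q ∈ PySem.List.pyRange s e 1,
    ((k - PySem.List.pyGetD a q 0) ∈ seen ∨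
      ∃ p ∈ PySem.List.pyRange s q 1,
        PySem.List.pyGetD a p 0 + PySem.List.pyGetD a q 0 = k)

-- "A's triple loop marks position t of the indicator array"
abbrev MarkA (a : List Int) (m k : Int) (L : Nat) (t : Nat) : Prop :=
  ∃ i ∈ PySem.List.pyRange 0 (a.length : Int) 1,
    ∃ j ∈ PySem.List.pyRange (i + 1) (min (i + m) (a.length : Int)) 1,
      PySem.List.pyGetD a i 0 + PySem.List.pyGetD a j 0 = k ∧ j - i < m ∧
        i - (m - (j - i)) + 1 ≤ (t : Int) ∧ (t : Int) < i + 1 ∧ (t : Int) < (L : Int)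

-- the three nested loop bodies of A's port, named so the proofs can talk about them (defeq to the port's lambdas)
abbrev pvFin : List Int → Int → List Int := fun sub x =>
  if 0 ≤ x ∧ x < (sub.length : Int) then sub.set x.toNat 1 else sub

abbrev pvFmid (a : List Int) (m k i : Int) : List Int → Int → List Int := fun sub j =>
  if PySem.List.pyGetD a i 0 + PySem.List.pyGetD a j 0 = k then
    if j - i < m then
      (PySem.List.pyRange (i - (m - (j - i)) + 1) (i + 1) 1).foldl pvFin sub
    else sub
  else sub

abbrev pvFouter (a : List Int) (m k : Int) : List Int → Int → List Int := fun sub i =>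
  (PySem.List.pyRange (i + 1) (min (i + m) (a.length : Int)) 1).foldl (pvFmid a m k i) sub

abbrev pvPmid (a : List Int) (m k : Int) (L : Nat) (i : Int) (j : Int) (t : Nat) : Prop :=
  PySem.List.pyGetD a i 0 + PySem.List.pyGetD a j 0 = k ∧ j - i < m ∧
    i - (m - (j - i)) + 1 ≤ (t : Int) ∧ (t : Int) < i + 1 ∧ (t : Int) < (L : Int)

abbrev pvPout (a : List Int) (m k : Int) (L : Nat) (i : Int) (t : Nat) : Prop :=
  ∃ j ∈ PySem.List.pyRange (i + 1) (min (i + m) (a.length : Int)) 1, pvPmid a m k L i j t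

lemma findLoop_spec (a : List Int) (k : Int) :
    ∀ (c : Nat) (s e : Int) (seen : List Int), e ≤ s + c →
      pvFindLoop a k (PySem.List.pyRange s e 1) seen
        = if FoundFrom a k seen s e then 1 else 0 := by
  intro c
  induction c with
  | zero =>
    intro s e seen h
    have hnot : ¬ FoundFrom a k seen s e := by
      rintro ⟨q, hq, -⟩
      rw [PySem.List.mem_pyRange_one] at hq
      omega
    rw [if_neg hnot]
    conv_lhs => rw [PySem.List.pyRange_one_eq_nil (by omega : e ≤ s)]
    rfl
  | succ c ih =>
    intro s e seen h
    by_cases hse : e ≤ s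
    · have hnot : ¬ FoundFrom a k seen s e := by
        rintro ⟨q, hq, -⟩
        rw [PySem.List.mem_pyRange_one] at hq
        omega
      rw [if_neg hnot]
      conv_lhs => rw [PySem.List.pyRange_one_eq_nil hse]
      rfl
    · have hlt : s < e := by omega
      conv_lhs => rw [PySem.List.pyRange_one_cons hlt]
      simp only [pvFindLoop]
      by_cases hmem : (k - PySem.List.pyGetD a s 0) ∈ seen
      · rw [if_pos hmem, if_pos]
        exact ⟨s, by rw [PySem.List.mem_pyRange_one]; omega, Or.inl hmem⟩
      · rw [if_neg hmem, ih (s + 1) e (PySem.Set.add seen (PySem.List.pyGetD a s 0)) (by omega)]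
        refine if_congr ?_ rfl rfl
        constructor
        · rintro ⟨q, hq, hcase⟩
          rw [PySem.List.mem_pyRange_one] at hq
          refine ⟨q, by rw [PySem.List.mem_pyRange_one]; omega, ?_⟩
          rcases hcase with hm | ⟨p, hp, hsum⟩
          · rcases (PySem.Set.mem_add seen _ _).mp hm with hm' | hm'
            · exact Or.inl hm'
            · exact Or.inr ⟨s, by rw [PySem.List.mem_pyRange_one]; omega, by omega⟩
          · rw [PySem.List.mem_pyRange_one] at hp
            exact Or.inr ⟨p, by rw [PySem.List.mem_pyRange_one]; omega, hsum⟩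
        · rintro ⟨q, hq, hcase⟩
          rw [PySem.List.mem_pyRange_one] at hq
          by_cases hqs : q = s
          · subst hqs
            rcases hcase with hm | ⟨p, hp, hsum⟩
            · exact absurd hm hmem
            · rw [PySem.List.mem_pyRange_one] at hp
              omega
          · refine ⟨q, by rw [PySem.List.mem_pyRange_one]; omega, ?_⟩
            rcases hcase with hm | ⟨p, hp, hsum⟩
            · exact Or.inl ((PySem.Set.mem_add seen _ _).mpr (Or.inl hm))
            · rw [PySem.List.mem_pyRange_one] at hp
              by_cases hps : p = s
              · subst hps
                exact Or.inl ((PySem.Set.mem_add seen _ _).mpr (Or.inr (by omega)))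
              · exact Or.inr ⟨p, by rw [PySem.List.mem_pyRange_one]; omega, hsum⟩

lemma foldl_mark {α : Type} (f : List Int → α → List Int) (P : α → Nat → Prop) (L : Nat)
    (hlen : ∀ sub x, sub.length = L → (f sub x).length = L)
    (hpos : ∀ sub x t, sub.length = L → P x t → (f sub x)[t]? = some 1)
    (hneg : ∀ sub x t, sub.length = L → ¬ P x t → (f sub x)[t]? = sub[t]?) :
    ∀ (l : List α) (init : List Int), init.length = L →
      (l.foldl f init).length = L ∧
      ∀ t : Nat, ((∃ x ∈ l, P x t) → (l.foldl f init)[t]? = some 1) ∧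
                 ((¬ ∃ x ∈ l, P x t) → (l.foldl f init)[t]? = init[t]?) := by
  intro l
  induction l with
  | nil =>
    intro init hinit
    refine ⟨hinit, fun t => ⟨?_, fun _ => rfl⟩⟩
    rintro ⟨x, hx, -⟩
    exact absurd hx (List.not_mem_nil)
  | cons x l ih =>
    intro init hinit
    have h1 : (f init x).length = L := hlen _ _ hinit
    obtain ⟨hL, hT⟩ := ih (f init x) h1
    simp only [List.foldl_cons]
    refine ⟨hL, fun t => ⟨?_, ?_⟩⟩
    · rintro ⟨y, hy, hPy⟩
      rcases List.mem_cons.mp hy with rfl | hy'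
      · by_cases hex : ∃ z ∈ l, P z t
        · exact (hT t).1 hex
        · rw [(hT t).2 hex]
          exact hpos init y t hinit hPy
      · exact (hT t).1 ⟨y, hy', hPy⟩
    · intro hnex
      have hnl : ¬ ∃ z ∈ l, P z t := by
        rintro ⟨z, hz, hp⟩
        exact hnex ⟨z, List.mem_cons_of_mem _ hz, hp⟩
      have hnx : ¬ P x t := fun hp => hnex ⟨x, List.mem_cons_self, hp⟩
      rw [(hT t).2 hnl]
      exact hneg init x t hinit hnx

lemma solution_OK_eq_map (a : List Int) (m k : Int) :
    solution_OK a m k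
      = ((List.range ((a.length : Int) - m + 1).toNat).map
          (fun t => if MarkA a m k ((a.length : Int) - m + 1).toNat t then (1 : Int) else 0)).sum := by
  set L : Nat := ((a.length : Int) - m + 1).toNat with hLdef
  -- innermost marking loop
  have hin_len : ∀ (sub : List Int) (x : Int), sub.length = L → (pvFin sub x).length = L := by
    intro sub x h
    unfold pvFin
    split_ifs with hc
    · simpa using h
    · exact h
  have hin_pos : ∀ (sub : List Int) (x : Int) (t : Nat), sub.length = L →
      (x = (t : Int) ∧ (t : Int) < (L : Int)) → (pvFin sub x)[t]? = some 1 := by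
    rintro sub x t h ⟨hxt, htL⟩
    unfold pvFin
    rw [if_pos (by omega : 0 ≤ x ∧ x < (sub.length : Int))]
    have hx : x.toNat = t := by omega
    rw [hx]
    exact List.getElem?_set_self (by omega)
  have hin_neg : ∀ (sub : List Int) (x : Int) (t : Nat), sub.length = L →
      ¬ (x = (t : Int) ∧ (t : Int) < (L : Int)) → (pvFin sub x)[t]? = sub[t]? := by
    intro sub x t h hnp
    unfold pvFin
    split_ifs with hc
    · have hxt : x.toNat ≠ t := by
        intro he
        exact hnp (by omega)
      exact List.getElem?_set_ne hxt
    · rfl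
  have hin := foldl_mark pvFin (fun x t => x = (t : Int) ∧ (t : Int) < (L : Int)) L hin_len hin_pos hin_neg
  -- middle loop, for a fixed i
  have hmid_len : ∀ (i : Int) (sub : List Int) (j : Int), sub.length = L →
      (pvFmid a m k i sub j).length = L := by
    intro i sub j h
    unfold pvFmid
    split_ifs with h1 h2
    · exact (hin _ sub h).1
    · exact h
    · exact h
  have hmid_pos : ∀ (i : Int) (sub : List Int) (j : Int) (t : Nat), sub.length = L →
      pvPmid a m k L i j t → (pvFmid a m k i sub j)[t]? = some 1 := by
    rintro i sub j t h ⟨h1, h2, h3, h4, h5⟩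
    unfold pvFmid
    rw [if_pos h1, if_pos h2]
    exact ((hin _ sub h).2 t).1
      ⟨(t : Int), by rw [PySem.List.mem_pyRange_one]; omega, rfl, h5⟩
  have hmid_neg : ∀ (i : Int) (sub : List Int) (j : Int) (t : Nat), sub.length = L →
      ¬ pvPmid a m k L i j t → (pvFmid a m k i sub j)[t]? = sub[t]? := by
    intro i sub j t h hnp
    unfold pvFmid
    split_ifs with h1 h2
    · refine ((hin _ sub h).2 t).2 ?_
      rintro ⟨x, hx, hxt, hxL⟩
      rw [PySem.List.mem_pyRange_one] at hx
      exact hnp ⟨h1, h2, by omega, by omega, hxL⟩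
    · rfl
    · rfl
  have hmidfold := fun i => foldl_mark (pvFmid a m k i) (pvPmid a m k L i) L
    (hmid_len i) (hmid_pos i) (hmid_neg i)
  -- outer loop
  have hout_len : ∀ (sub : List Int) (i : Int), sub.length = L → (pvFouter a m k sub i).length = L :=
    fun sub i h => (hmidfold i _ sub h).1
  have hout_pos : ∀ (sub : List Int) (i : Int) (t : Nat), sub.length = L →
      pvPout a m k L i t → (pvFouter a m k sub i)[t]? = some 1 :=
    fun sub i t h hp => ((hmidfold i _ sub h).2 t).1 hp
  have hout_neg : ∀ (sub : List Int) (i : Int) (t : Nat), sub.length = L →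
      ¬ pvPout a m k L i t → (pvFouter a m k sub i)[t]? = sub[t]? :=
    fun sub i t h hp => ((hmidfold i _ sub h).2 t).2 hp
  have hinit_len :
      ((PySem.List.pyRange 0 ((a.length : Int) - m + 1) 1).map (fun _ => (0 : Int))).length = L := by
    rw [List.length_map, PySem.List.length_pyRange_one]
    omega
  obtain ⟨hflen, hft⟩ := foldl_mark (pvFouter a m k) (pvPout a m k L) L
    hout_len hout_pos hout_neg (PySem.List.pyRange 0 (a.length : Int) 1)
    ((PySem.List.pyRange 0 ((a.length : Int) - m + 1) 1).map (fun _ => (0 : Int))) hinit_len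
  have heq : (PySem.List.pyRange 0 (a.length : Int) 1).foldl (pvFouter a m k)
        ((PySem.List.pyRange 0 ((a.length : Int) - m + 1) 1).map (fun _ => (0 : Int)))
      = (List.range L).map (fun t => if MarkA a m k L t then (1 : Int) else 0) := by
    apply List.ext_getElem?
    intro t
    have hrhs : ((List.range L).map (fun t => if MarkA a m k L t then (1 : Int) else 0))[t]?
        = (List.range L)[t]?.map (fun t => if MarkA a m k L t then (1 : Int) else 0) :=
      List.getElem?_map ..
    by_cases htL : t < L
    · rw [hrhs, List.getElem?_range htL, Option.map_some]
      by_cases hM : MarkA a m k L t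
      · rw [(hft t).1 hM, if_pos hM]
      · have hlhs0 : ((PySem.List.pyRange 0 ((a.length : Int) - m + 1) 1).map
            (fun _ => (0 : Int)))[t]? = some 0 := by
          rw [List.getElem?_map,
            List.getElem?_eq_getElem (by rw [PySem.List.length_pyRange_one]; omega)]
          rfl
        rw [(hft t).2 hM, hlhs0, if_neg hM]
    · rw [hrhs, List.getElem?_eq_none (l := List.range L) (i := t) (by simp; omega),
        Option.map_none]
      exact List.getElem?_eq_none (by rw [hflen]; omega)
  show ((PySem.List.pyRange 0 (a.length : Int) 1).foldl (pvFouter a m k)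
        ((PySem.List.pyRange 0 ((a.length : Int) - m + 1) 1).map (fun _ => (0 : Int)))).sum = _
  rw [heq]

lemma pyRange_zero_toNat (e : Int) :
    PySem.List.pyRange 0 e 1 = List.map (fun i : Nat => (i : Int)) (List.range e.toNat) := by
  by_cases h : e ≤ 0
  · rw [PySem.List.pyRange_one_eq_nil h]
    have h0 : e.toNat = 0 := by omega
    rw [h0]
    rfl
  · have h1 : e = ((e.toNat : Nat) : Int) := by omega
    conv_lhs => rw [h1]
    exact PySem.List.pyRange_zero_natCast e.toNat

lemma alt_eq_map (a : List Int) (m k : Int) :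
    solution_OK_alt a m k
      = ((List.range ((a.length : Int) - m + 1).toNat).map
          (fun t : Nat => if FoundFrom a k [] (t : Int) ((t : Int) + m) then (1 : Int) else 0)).sum := by
  unfold solution_OK_alt
  rw [PySem.List.foldl_add, zero_add, pyRange_zero_toNat, List.map_map]
  congr 1
  refine List.map_congr_left (fun t _ => ?_)
  show pvFindLoop a k (PySem.List.pyRange (t : Int) ((t : Int) + m) 1) PySem.Set.empty
      = if FoundFrom a k [] (t : Int) ((t : Int) + m) then (1 : Int) else 0
  exact findLoop_spec a k m.toNat (t : Int) ((t : Int) + m) PySem.Set.empty (by omega)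

lemma bridge (a : List Int) (m k : Int) (t : Nat)
    (ht : t < ((a.length : Int) - m + 1).toNat) :
    MarkA a m k ((a.length : Int) - m + 1).toNat t
      ↔ FoundFrom a k [] (t : Int) ((t : Int) + m) := by
  simp only [MarkA, FoundFrom, PySem.List.mem_pyRange_one, List.not_mem_nil, false_or]
  constructor
  · rintro ⟨i, hi, j, hj, h1, h2, h3, h4, h5⟩
    exact ⟨j, ⟨by omega, by omega⟩, i, ⟨by omega, by omega⟩, h1⟩
  · rintro ⟨q, hq, p, hp, hsum⟩
    have ht' : (t : Int) < (a.length : Int) - m + 1 := by omega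
    refine ⟨p, ⟨by omega, by omega⟩, q, ⟨by omega, by omega⟩, hsum,
      by omega, by omega, by omega, by omega⟩

-- ===== VERDICT (by name: the statement is the Claim_ definition above) =====
theorem solution_OK_spec : Claim_equal_solution_OK := by
  intro a m k _
  unfold Spec_solution_OK
  rw [solution_OK_eq_map, alt_eq_map]
  congr 1
  refine List.map_congr_left (fun t htm => ?_)
  rw [List.mem_range] at htm
  exact if_congr (bridge a m k t htm) rfl rfl
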